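-- pv_equiv track=rewrite | github.com/tree698/Myself_Study | Coding_Test/L0-개미군단.py | solution
-- ===== SOURCE A (Python) =====
-- def solution(hp):
--     answer = 0
--     remainder = hp
--     for x in [5, 3, 1]:
--         if remainder // x > 0:
--             answer += remainder // x
--             remainder = remainder % x
--     return answer
-- ===== SOURCE B (Python) =====
-- # B: residue lookup table instead of the greedy division cascade.
-- # answer = (number of 5-ant groups) + precomputed ant count for the leftover hp%5.
-- _REST = (0, 1, 2, 1, 2)
--
-- def solution(hp):
--     if hp < 0:
--         return 0
--     return hp // 5 + _REST[hp % 5]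
-- ===== Notes on version B (the rewrite author's own statement) =====
-- stated objective: simpler
-- what changed: Replaced the greedy division cascade over [5,3,1] by a precomputed 5-entry residue lookup table: answer = hp//5 + _REST[hp%5], with negative hp returning 0 as in A.
import Mathlib
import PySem

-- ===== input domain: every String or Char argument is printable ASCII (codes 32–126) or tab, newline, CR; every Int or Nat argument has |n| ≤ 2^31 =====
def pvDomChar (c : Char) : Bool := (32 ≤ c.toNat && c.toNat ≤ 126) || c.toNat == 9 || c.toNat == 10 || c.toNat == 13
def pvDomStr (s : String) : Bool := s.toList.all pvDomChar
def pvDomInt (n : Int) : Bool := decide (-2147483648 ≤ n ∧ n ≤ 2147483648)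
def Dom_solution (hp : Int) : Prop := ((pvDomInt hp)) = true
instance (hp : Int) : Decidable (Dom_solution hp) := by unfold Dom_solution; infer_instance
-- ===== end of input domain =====

-- B replaces A's greedy division cascade by a residue lookup table (simpler, same O(1) cost).

-- ===== PORT A =====
def solution (hp : Int) : Int :=
  let st := [(5 : Int), 3, 1].foldl
    (fun (st : Int × Int) x =>
      let (answer, remainder) := st
      if PySem.Int.floordiv remainder x > 0 then
        (answer + PySem.Int.floordiv remainder x, PySem.Int.mod remainder x)
      else st)
    (0, hp)
  st.1

-- ===== PORT B =====
-- _REST[hp % 5]: the index is in [0,5) when hp ≥ 0, so pyGet? always returns some; .getD 0 is dead.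
def solution_alt (hp : Int) : Int :=
  if hp < 0 then 0
  else PySem.Int.floordiv hp 5
       + (PySem.List.pyGet? ([0, 1, 2, 1, 2] : List Int) (PySem.Int.mod hp 5)).getD 0

-- ===== PRECONDITION & SPEC =====
def Spec_solution (hp : Int) (out : Int) : Prop := out = solution_alt hp
instance (hp : Int) (out : Int) : Decidable (Spec_solution hp out) := by unfold Spec_solution; infer_instance

-- ===== CLAIM (what is proved, stated in full; the proofs are below) =====
def Claim_equal_solution : Prop := ∀ (hp : Int), Dom_solution hp → Spec_solution hp (solution hp)

-- ===== LEMMAS AND PROOFS =====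

-- ===== VERDICT (by name: the statement is the Claim_ definition above) =====
theorem solution_spec : Claim_equal_solution := by
  intro hp _
  unfold Spec_solution solution solution_alt
  simp only [List.foldl]
  have f5 : ∀ a : Int, PySem.Int.floordiv a 5 = a / 5 :=
    fun a => PySem.Int.floordiv_eq_ediv_of_pos (by norm_num)
  have f3 : ∀ a : Int, PySem.Int.floordiv a 3 = a / 3 :=
    fun a => PySem.Int.floordiv_eq_ediv_of_pos (by norm_num)
  have f1 : ∀ a : Int, PySem.Int.floordiv a 1 = a / 1 :=
    fun a => PySem.Int.floordiv_eq_ediv_of_pos (by norm_num)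
  have m5 : ∀ a : Int, PySem.Int.mod a 5 = a % 5 :=
    fun a => PySem.Int.mod_eq_emod_of_pos (by norm_num)
  have m3 : ∀ a : Int, PySem.Int.mod a 3 = a % 3 :=
    fun a => PySem.Int.mod_eq_emod_of_pos (by norm_num)
  have m1 : ∀ a : Int, PySem.Int.mod a 1 = a % 1 :=
    fun a => PySem.Int.mod_eq_emod_of_pos (by norm_num)
  simp only [f5, f3, f1, m5, m1, m3]
  by_cases hneg : hp < 0
  · simp only [hneg, if_true]
    split_ifs <;> simp_all <;> omega
  · simp only [hneg, if_false]
    have hr : hp % 5 = 0 ∨ hp % 5 = 1 ∨ hp % 5 = 2 ∨ hp % 5 = 3 ∨ hp % 5 = 4 := by omega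
    have t0 : (PySem.List.pyGet? ([0, 1, 2, 1, 2] : List Int) 0).getD 0 = 0 := by decide
    have t1 : (PySem.List.pyGet? ([0, 1, 2, 1, 2] : List Int) 1).getD 0 = 1 := by decide
    have t2 : (PySem.List.pyGet? ([0, 1, 2, 1, 2] : List Int) 2).getD 0 = 2 := by decide
    have t3 : (PySem.List.pyGet? ([0, 1, 2, 1, 2] : List Int) 3).getD 0 = 1 := by decide
    have t4 : (PySem.List.pyGet? ([0, 1, 2, 1, 2] : List Int) 4).getD 0 = 2 := by decide
    rcases hr with h | h | h | h | h <;> rw [h] <;>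
      simp only [t0, t1, t2, t3, t4] <;>
      split_ifs <;> simp only [] <;> omega
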